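-- pv_equiv track=rewrite | github.com/doristien1208/GraduatedProject | promptGenerateFixed.py | find_and_call_agent
-- ===== SOURCE A (Python) =====
-- def find_and_call_agent(trigger, agent_data):
--     matched_role = []
--     # 確保triggers是列表形式
--     if not isinstance(trigger, list):
--         trigger = [trigger]
--
--     for trigger in trigger:
--         for role, details in agent_data.items():
--             for detail in details:
--                 if 'tag' in detail and (trigger in detail['tag'] if isinstance(detail['tag'], list) else trigger == detail['tag']):
--                     if role not in matched_role:  # 避免重複角色
--                         matched_role.append(role)
--     return matched_role
-- ===== SOURCE B (Python) =====
-- def find_and_call_agent(trigger, agent_data):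
--     # Build a tag -> ordered list of roles index in one pass, then answer by lookup.
--     index = {}
--     for role, details in agent_data.items():
--         for detail in details:
--             for t in detail.get('tag', ()):
--                 roles = index.setdefault(t, [])
--                 if role not in roles:
--                     roles.append(role)
--     return index.get(trigger, [])
-- ===== Notes on version B (the rewrite author's own statement) =====
-- stated objective: alternative
-- what changed: B builds a tag->ordered-roles index in one pass over all details and answers the query with a single dictionary lookup, instead of A's per-trigger scan of every detail with a linear duplicate check against the result list.
import Mathlib
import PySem

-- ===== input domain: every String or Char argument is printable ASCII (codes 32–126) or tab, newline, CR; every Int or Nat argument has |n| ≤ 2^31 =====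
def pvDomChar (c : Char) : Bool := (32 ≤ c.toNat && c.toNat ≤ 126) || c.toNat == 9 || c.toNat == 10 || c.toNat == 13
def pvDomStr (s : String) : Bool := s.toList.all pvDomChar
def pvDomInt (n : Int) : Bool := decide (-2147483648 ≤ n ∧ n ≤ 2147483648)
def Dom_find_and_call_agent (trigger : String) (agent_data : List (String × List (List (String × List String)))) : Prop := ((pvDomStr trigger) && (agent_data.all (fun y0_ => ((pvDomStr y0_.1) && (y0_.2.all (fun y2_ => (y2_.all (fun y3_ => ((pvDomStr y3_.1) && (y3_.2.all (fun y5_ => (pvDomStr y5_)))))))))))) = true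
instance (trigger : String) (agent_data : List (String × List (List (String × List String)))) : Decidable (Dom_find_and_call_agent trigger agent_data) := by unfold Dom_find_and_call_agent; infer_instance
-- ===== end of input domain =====

-- B replaces A's per-trigger scan (with a linear duplicate check on the result list)
-- by building a tag → ordered-roles index once and answering with one dictionary lookup (objective: alternative).

-- ===== PORT A =====
-- literal transliteration of A: trigger is a single string here, so the `isinstance(trigger, list)`
-- wrap yields the one-element list [trigger] and the outer loop runs exactly once with this trigger;
-- `detail['tag']` is a list on this domain, so the membership branch `trigger in detail['tag']` is taken.
def find_and_call_agent (trigger : String) (agent_data : List (String × List (List (String × List String)))) : List String :=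
  agent_data.foldl (fun acc rd =>
    rd.2.foldl (fun acc detail =>
      match PySem.Dict.get? (PySem.Dict.mk detail) "tag" with    -- 'tag' in detail / detail['tag']
      | some tag =>
          if trigger ∈ tag then
            (if rd.1 ∈ acc then acc else acc ++ [rd.1])          -- role not in matched_role → append
          else acc
      | none => acc) acc) []

-- ===== PORT B =====
-- B-side helper: the tag → ordered-roles index (Source B's `index` dict; `detail.get('tag', ())` with
-- the empty tuple default is ported as getD … [] — both iterate nothing when 'tag' is absent).
def pvBuildIndex (agent_data : List (String × List (List (String × List String)))) : PySem.Dict String (List String) :=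
  agent_data.foldl (fun idx rd =>
    rd.2.foldl (fun idx detail =>
      (PySem.Dict.getD (PySem.Dict.mk detail) "tag" []).foldl (fun idx t =>
        let roles := PySem.Dict.getD idx t []
        if rd.1 ∈ roles then idx else idx.insert t (roles ++ [rd.1])) idx) idx) PySem.Dict.empty

def find_and_call_agent_alt (trigger : String) (agent_data : List (String × List (List (String × List String)))) : List String :=
  PySem.Dict.getD (pvBuildIndex agent_data) trigger []

-- ===== PRECONDITION & SPEC =====
def Spec_find_and_call_agent (trigger : String) (agent_data : List (String × List (List (String × List String)))) (out : List String) : Prop := out = find_and_call_agent_alt trigger agent_data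
instance (trigger : String) (agent_data : List (String × List (List (String × List String)))) (out : List String) : Decidable (Spec_find_and_call_agent trigger agent_data out) := by unfold Spec_find_and_call_agent; infer_instance

-- ===== CLAIM (what is proved, stated in full; the proofs are below) =====
def Claim_equal_find_and_call_agent : Prop := ∀ (trigger : String) (agent_data : List (String × List (List (String × List String)))), Dom_find_and_call_agent trigger agent_data → Spec_find_and_call_agent trigger agent_data (find_and_call_agent trigger agent_data)

-- ===== LEMMAS AND PROOFS =====

-- effect of one detail's tag-list fold on the index entry for `trigger`
theorem pv_tags_fold (trigger role : String) (ts : List String)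
    (idx : PySem.Dict String (List String)) :
    PySem.Dict.getD (ts.foldl (fun idx t =>
        let roles := PySem.Dict.getD idx t []
        if role ∈ roles then idx else idx.insert t (roles ++ [role])) idx) trigger []
      = (if trigger ∈ ts ∧ role ∉ PySem.Dict.getD idx trigger []
          then PySem.Dict.getD idx trigger [] ++ [role]
          else PySem.Dict.getD idx trigger []) := by
  induction ts generalizing idx with
  | nil => simp
  | cons t ts ih =>
    simp only [List.foldl_cons, ih]
    by_cases ht : t = trigger
    · subst ht
      by_cases hr : role ∈ PySem.Dict.getD idx t []
      · simp [hr]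
      · simp [hr, PySem.Dict.getD_insert_self]
    · have hget : PySem.Dict.getD (if role ∈ PySem.Dict.getD idx t [] then idx
          else idx.insert t (PySem.Dict.getD idx t [] ++ [role])) trigger []
          = PySem.Dict.getD idx trigger [] := by
        have hne : trigger ≠ t := fun h => ht h.symm
        split
        · rfl
        · simp [PySem.Dict.getD_insert, hne]
      simp only [hget]
      have hne : trigger ≠ t := fun h => ht h.symm
      by_cases hm : trigger ∈ ts <;> simp [hm, hne]
  
theorem pv_details_fold (trigger role : String) (ds : List (List (String × List String)))
    (idx : PySem.Dict String (List String)) :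
    PySem.Dict.getD (ds.foldl (fun idx detail =>
        (PySem.Dict.getD (PySem.Dict.mk detail) "tag" []).foldl (fun idx t =>
          let roles := PySem.Dict.getD idx t []
          if role ∈ roles then idx else idx.insert t (roles ++ [role])) idx) idx) trigger []
      = ds.foldl (fun acc detail =>
          match PySem.Dict.get? (PySem.Dict.mk detail) "tag" with
          | some tag => if trigger ∈ tag then (if role ∈ acc then acc else acc ++ [role]) else acc
          | none => acc) (PySem.Dict.getD idx trigger []) := by
  induction ds generalizing idx with
  | nil => rfl
  | cons d ds ih =>
    simp only [List.foldl_cons, ih, pv_tags_fold]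
    congr 1
    cases hg : PySem.Dict.get? (PySem.Dict.mk d) "tag" with
    | none => simp [PySem.Dict.getD, hg]
    | some tag =>
      simp only [PySem.Dict.getD, hg, Option.getD_some]
      by_cases hm : trigger ∈ tag
      · by_cases hr : role ∈ PySem.Dict.getD idx trigger [] <;> simp [hm]
      · simp [hm]

theorem pv_main (trigger : String) (agent_data : List (String × List (List (String × List String))))
    (idx : PySem.Dict String (List String)) :
    PySem.Dict.getD (agent_data.foldl (fun idx rd =>
        rd.2.foldl (fun idx detail =>
          (PySem.Dict.getD (PySem.Dict.mk detail) "tag" []).foldl (fun idx t =>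
            let roles := PySem.Dict.getD idx t []
            if rd.1 ∈ roles then idx else idx.insert t (roles ++ [rd.1])) idx) idx) idx) trigger []
      = agent_data.foldl (fun acc rd =>
          rd.2.foldl (fun acc detail =>
            match PySem.Dict.get? (PySem.Dict.mk detail) "tag" with
            | some tag => if trigger ∈ tag then (if rd.1 ∈ acc then acc else acc ++ [rd.1]) else acc
            | none => acc) acc) (PySem.Dict.getD idx trigger []) := by
  induction agent_data generalizing idx with
  | nil => rfl
  | cons rd rest ih => simp only [List.foldl_cons, ih, pv_details_fold]

-- ===== VERDICT (by name: the statement is the Claim_ definition above) =====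
theorem find_and_call_agent_spec : Claim_equal_find_and_call_agent := by
  intro trigger agent_data _
  unfold Spec_find_and_call_agent find_and_call_agent find_and_call_agent_alt pvBuildIndex
  rw [pv_main]
  rfl
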